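-- pv_equiv track=rewrite | github.com/mdeslee/A-D---Pycharm | AD/Introduction/Zigzag.py | iszigzag
-- ===== SOURCE A (Python) =====
-- def iszigzag(lijst):
--     j= 0
--     while j < len(lijst)-1:
--         if j % 2 == 0:
--             if lijst[j] < lijst[j+1]:
--                 return False
--         else:
--             if lijst[j] > lijst[j+1]:
--                 return False
--         j += 1
--     return True
-- ===== SOURCE B (Python) =====
-- def iszigzag(lijst):
--     n = len(lijst)
--     for j in range(0, n - 1, 2):
--         if lijst[j] < lijst[j + 1]:
--             return False
--     for j in range(1, n - 1, 2):
--         if lijst[j] > lijst[j + 1]: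
--             return False
--     return True
-- ===== Notes on version B (the rewrite author's own statement) =====
-- stated objective: alternative
-- what changed: Replaces A's single index loop with a parity branch inside by two branch-free passes: one over the even indices checking '<' violations, one over the odd indices checking '>' violations.
import Mathlib
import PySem

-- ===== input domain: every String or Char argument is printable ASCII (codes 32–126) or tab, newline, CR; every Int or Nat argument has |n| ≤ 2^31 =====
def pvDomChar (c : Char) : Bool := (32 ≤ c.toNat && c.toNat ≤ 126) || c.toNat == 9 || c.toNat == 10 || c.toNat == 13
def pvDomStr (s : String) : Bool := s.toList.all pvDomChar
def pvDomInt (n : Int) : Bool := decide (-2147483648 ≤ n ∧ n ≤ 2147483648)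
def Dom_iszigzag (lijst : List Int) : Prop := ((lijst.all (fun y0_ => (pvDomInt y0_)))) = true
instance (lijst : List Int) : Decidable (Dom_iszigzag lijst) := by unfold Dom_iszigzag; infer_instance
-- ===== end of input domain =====

-- B replaces A's single index loop with a parity branch by two branch-free passes
-- (even-index '<' check, then odd-index '>' check): an alternative decomposition, same cost.


-- ===== PORT A =====
-- while-loop of A: j runs from 0; indices j, j+1 are always in range, so pyGetD's default is never used
def iszigzagLoop (lijst : List Int) (j : Nat) : Bool :=
  if (j : Int) < (lijst.length : Int) - 1 then
    if j % 2 == 0 then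
      if PySem.List.pyGetD lijst (j : Int) 0 < PySem.List.pyGetD lijst ((j : Int) + 1) 0 then false
      else iszigzagLoop lijst (j + 1)
    else
      if PySem.List.pyGetD lijst (j : Int) 0 > PySem.List.pyGetD lijst ((j : Int) + 1) 0 then false
      else iszigzagLoop lijst (j + 1)
  else true
termination_by lijst.length - j
decreasing_by all_goals omega

def iszigzag (lijst : List Int) : Bool := iszigzagLoop lijst 0

-- ===== PORT B =====
def iszigzag_alt (lijst : List Int) : Bool :=
  let n : Int := PySem.List.len lijst
  if (PySem.List.pyRange 0 (n - 1) 2).any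
      (fun j => PySem.List.pyGetD lijst j 0 < PySem.List.pyGetD lijst (j + 1) 0) then false
  else if (PySem.List.pyRange 1 (n - 1) 2).any
      (fun j => PySem.List.pyGetD lijst j 0 > PySem.List.pyGetD lijst (j + 1) 0) then false
  else true

-- ===== PRECONDITION & SPEC =====
def Spec_iszigzag (lijst : List Int) (out : Bool) : Prop := out = iszigzag_alt lijst
instance (lijst : List Int) (out : Bool) : Decidable (Spec_iszigzag lijst out) := by unfold Spec_iszigzag; infer_instance

-- ===== CLAIM (what is proved, stated in full; the proofs are below) =====
def Claim_equal_iszigzag : Prop := ∀ (lijst : List Int), Dom_iszigzag lijst → Spec_iszigzag lijst (iszigzag lijst)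

-- ===== LEMMAS AND PROOFS =====

-- the per-index condition both programs check
def zigOk (lijst : List Int) (k : Int) : Prop :=
  if k % 2 = 0 then ¬ PySem.List.pyGetD lijst k 0 < PySem.List.pyGetD lijst (k + 1) 0
  else ¬ PySem.List.pyGetD lijst k 0 > PySem.List.pyGetD lijst (k + 1) 0

lemma iszigzagLoop_true_iff (lijst : List Int) (j : Nat) :
    iszigzagLoop lijst j = true ↔
      ∀ k : Int, (j : Int) ≤ k → k < (lijst.length : Int) - 1 → zigOk lijst k := by
  fun_induction iszigzagLoop lijst j with
  | case1 j hlt hpar hviol =>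
      simp only [beq_iff_eq] at hpar
      constructor
      · intro h; exact absurd h (by simp)
      · intro h
        have hk := h (j : Int) le_rfl hlt
        unfold zigOk at hk
        rw [if_pos (by omega)] at hk
        exact absurd hviol hk
  | case2 j hlt hpar hviol ih =>
      rw [ih]
      simp only [beq_iff_eq] at hpar
      constructor
      · intro h k hjk hk
        rcases eq_or_lt_of_le hjk with heq | hjk'
        · subst heq; unfold zigOk; rw [if_pos (by omega)]; exact hviol
        · exact h k (by push_cast; omega) hk
      · intro h k hjk hk; exact h k (by push_cast at hjk ⊢; omega) hk
  | case3 j hlt hpar hviol =>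
      simp only [beq_iff_eq] at hpar
      constructor
      · intro h; exact absurd h (by simp)
      · intro h
        have hk := h (j : Int) le_rfl hlt
        unfold zigOk at hk
        rw [if_neg (by omega)] at hk
        exact absurd hviol hk
  | case4 j hlt hpar hviol ih =>
      rw [ih]
      simp only [beq_iff_eq] at hpar
      constructor
      · intro h k hjk hk
        rcases eq_or_lt_of_le hjk with heq | hjk'
        · subst heq; unfold zigOk; rw [if_neg (by omega)]; exact hviol
        · exact h k (by push_cast; omega) hk
      · intro h k hjk hk; exact h k (by push_cast at hjk ⊢; omega) hk
  | case5 j hge =>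
      constructor
      · intro _ k hjk hk; exfalso; omega
      · intro _; rfl

lemma iszigzag_alt_true_iff (lijst : List Int) :
    iszigzag_alt lijst = true ↔
      ∀ k : Int, 0 ≤ k → k < (lijst.length : Int) - 1 → zigOk lijst k := by
  unfold iszigzag_alt
  simp only [PySem.List.len_eq]
  split_ifs with h1 h2
  · simp only [List.any_eq_true, decide_eq_true_eq] at h1
    obtain ⟨j, hj, hviol⟩ := h1
    rw [PySem.List.mem_pyRange_iff_of_pos (by norm_num)] at hj
    obtain ⟨hj0, hjlt, hdvd⟩ := hj
    constructor
    · intro h; exact absurd h (by simp)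
    · intro h
      have hk := h j hj0 hjlt
      unfold zigOk at hk
      rw [if_pos (by omega)] at hk
      exact absurd hviol hk
  · simp only [List.any_eq_true, decide_eq_true_eq] at h2
    obtain ⟨j, hj, hviol⟩ := h2
    rw [PySem.List.mem_pyRange_iff_of_pos (by norm_num)] at hj
    obtain ⟨hj0, hjlt, hdvd⟩ := hj
    constructor
    · intro h; exact absurd h (by simp)
    · intro h
      have hk := h j (by omega) hjlt
      unfold zigOk at hk
      rw [if_neg (by omega)] at hk
      exact absurd hviol hk
  · simp only [List.any_eq_true, decide_eq_true_eq, not_exists, not_and] at h1 h2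
    constructor
    · intro _ k hk0 hk
      unfold zigOk
      by_cases hpar : k % 2 = 0
      · rw [if_pos hpar]
        refine h1 k ?_
        rw [PySem.List.mem_pyRange_iff_of_pos (by norm_num)]
        exact ⟨hk0, hk, by omega⟩
      · rw [if_neg hpar]
        refine h2 k ?_
        rw [PySem.List.mem_pyRange_iff_of_pos (by norm_num)]
        exact ⟨by omega, hk, by omega⟩
    · intro _; rfl

-- ===== VERDICT (by name: the statement is the Claim_ definition above) =====
theorem iszigzag_spec : Claim_equal_iszigzag := by
  intro lijst _
  unfold Spec_iszigzag iszigzag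
  rw [Bool.eq_iff_iff, iszigzagLoop_true_iff, iszigzag_alt_true_iff]
  constructor
  · intro h k hk0 hk; exact h k (by exact_mod_cast hk0) hk
  · intro h k hk0 hk; exact h k (by exact_mod_cast hk0) hk
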